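-- pv_equiv track=rewrite | github.com/pa959shanajith/automation_client | plugins/Generic/file_operations_xml.py | igSplit
-- ===== SOURCE A (Python) =====
-- def igSplit(t):
--     splitList = []
--     start = 0
--     si = 0
--     for i in range(0,len(t)):
--         if(t[i]==' '):
--             si = i
--         if(i>0 and t[i-1]=='=' and t[i]=='"'):
--             splitList.append(t[start:si])
--             start=si
--             while (t[start]==' ' and start<len(t)):
--                 start=start+1
--     if(start<len(t)):
--         splitList.append(t[start:len(t)])
--     del start,si,t,i
--     return splitList
-- ===== SOURCE B (Python) =====
-- def igSplit(t):
--     n = len(t)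
--     # pass 1: collect the ='" marker positions
--     markers = [i for i in range(n) if i > 0 and t[i-1] == '=' and t[i] == '"']
--     # pass 2: slice at each marker's cut point (last space before it, else 0)
--     out = []
--     start = 0
--     for i in markers:
--         cut = t.rfind(' ', 0, i)
--         if cut == -1:
--             cut = 0
--         out.append(t[start:cut])
--         s = cut
--         while s < n and t[s] == ' ':
--             s += 1
--         start = s
--     if start < n:
--         out.append(t[start:n])
--     return out
-- ===== Notes on version B (the rewrite author's own statement) =====
-- stated objective: alternative
-- what changed: Replaces A's single char-by-char state machine (tracking last-space and segment-start while scanning) by a two-pass decomposition: first collect all ='" marker indices, then slice the string at each marker's cut point computed with rfind.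
import Mathlib
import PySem

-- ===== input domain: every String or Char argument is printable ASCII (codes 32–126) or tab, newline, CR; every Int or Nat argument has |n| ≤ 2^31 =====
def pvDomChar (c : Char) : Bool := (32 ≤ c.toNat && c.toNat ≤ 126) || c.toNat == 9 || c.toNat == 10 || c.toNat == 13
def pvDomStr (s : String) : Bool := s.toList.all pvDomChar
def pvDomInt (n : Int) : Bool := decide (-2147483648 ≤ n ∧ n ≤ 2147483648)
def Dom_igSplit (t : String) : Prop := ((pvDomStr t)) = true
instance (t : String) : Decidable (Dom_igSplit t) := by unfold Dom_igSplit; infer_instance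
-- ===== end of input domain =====

-- B replaces A's char-by-char state machine by a two-pass marker-index-then-slice decomposition (alternative, not faster).


-- ===== PORT A =====
-- Python slice t[a:b] with 0 ≤ a, b (exact there)
def sliceCl (cs : List Char) (a b : Nat) : List Char := (cs.drop a).take (b - a)

-- the space-skipping while loop shared verbatim by both Pythons
-- (exact: in both programs the scanned index never exceeds the length while the char is ' ')
def skipSp (cs : List Char) : Nat → Nat → Nat
  | 0, s => s
  | fuel + 1, s => if cs.getD s '\x00' = ' ' ∧ s < cs.length then skipSp cs fuel (s + 1) else s

-- one iteration of A's for-loop body; state = (splitList, start, si)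
def stepA (cs : List Char) (st : List (List Char) × Nat × Nat) (i : Nat) :
    List (List Char) × Nat × Nat :=
  let si1 := if cs.getD i '\x00' = ' ' then i else st.2.2
  if 0 < i ∧ cs.getD (i - 1) '\x00' = '=' ∧ cs.getD i '\x00' = '"' then
    (st.1 ++ [sliceCl cs st.2.1 si1], skipSp cs (cs.length + 1) si1, si1)
  else
    (st.1, st.2.1, si1)

def igCoreA (cs : List Char) : List (List Char) :=
  let st := (List.range cs.length).foldl (stepA cs) ([], 0, 0)
  if st.2.1 < cs.length then st.1 ++ [cs.drop st.2.1] else st.1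

def igSplit (t : String) : List String := (igCoreA t.toList).map String.ofList

-- ===== PORT B =====
-- t.rfind(' ', 0, i) with the -1 result replaced by 0, as Source B does
def cutAt (cs : List Char) (i : Nat) : Nat :=
  (List.range i).foldl (fun acc j => if cs.getD j '\x00' = ' ' then j else acc) 0

def markerB (cs : List Char) (i : Nat) : Bool :=
  decide (0 < i) && decide (cs.getD (i - 1) '\x00' = '=') && decide (cs.getD i '\x00' = '"')

-- one iteration of Source B's for-loop over the markers; state = (out, start)
def stepB (cs : List Char) (st : List (List Char) × Nat) (i : Nat) : List (List Char) × Nat :=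
  let cut := cutAt cs i
  (st.1 ++ [sliceCl cs st.2 cut], skipSp cs (cs.length + 1) cut)

def igCoreB (cs : List Char) : List (List Char) :=
  let ms := (List.range cs.length).filter (markerB cs)
  let st := ms.foldl (stepB cs) ([], 0)
  if st.2 < cs.length then st.1 ++ [cs.drop st.2] else st.1

def igSplit_alt (t : String) : List String := (igCoreB t.toList).map String.ofList

-- ===== PRECONDITION & SPEC =====
-- Pre_ excludes only the empty string, on which A raises UnboundLocalError (the loop variable
-- i is never bound before the `del` statement); B naturally returns [] there.
def Pre_igSplit (t : String) : Prop := t ≠ ""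
instance (t : String) : Decidable (Pre_igSplit t) := by unfold Pre_igSplit; infer_instance
def pvWitness_igSplit : String := ("a=\"1\" b=\"2\"")

def Spec_igSplit (t : String) (out : List String) : Prop := out = igSplit_alt t
instance (t : String) (out : List String) : Decidable (Spec_igSplit t out) := by unfold Spec_igSplit; infer_instance

-- ===== CLAIM (what is proved, stated in full; the proofs are below) =====
def Claim_equal_igSplit : Prop := ∀ (t : String), Dom_igSplit t → Pre_igSplit t → Spec_igSplit t (igSplit t)

-- ===== LEMMAS AND PROOFS =====
lemma cutAt_succ (cs : List Char) (k : Nat) :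
    cutAt cs (k + 1) = if cs.getD k '\x00' = ' ' then k else cutAt cs k := by
  simp [cutAt, List.range_succ]

-- A's loop over range k equals B's loop over the markers below k, with si tracking cutAt cs k
lemma loop_eq (cs : List Char) (k : Nat) :
    (List.range k).foldl (stepA cs) ([], 0, 0) =
      (let st := ((List.range k).filter (markerB cs)).foldl (stepB cs) ([], 0)
       (st.1, st.2, cutAt cs k)) := by
  induction k with
  | zero => rfl
  | succ k ih =>
    rw [List.range_succ, List.foldl_append, ih, List.filter_append, List.foldl_append]
    simp only [List.foldl_cons, List.foldl_nil, List.filter_cons, List.filter_nil]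
    by_cases hm : markerB cs k
    · have hk : 0 < k ∧ cs.getD (k - 1) '\x00' = '=' ∧ cs.getD k '\x00' = '"' := by
        simpa [markerB, and_assoc] using hm
      have hns : ¬ cs.getD k '\x00' = ' ' := by
        rw [hk.2.2]; decide
      simp only [List.getD] at hk hns
      simp [hm, stepA, stepB, hk.1, hk.2.1, hk.2.2, cutAt_succ, List.getD]
    · have hk : ¬ (0 < k ∧ cs.getD (k - 1) '\x00' = '=' ∧ cs.getD k '\x00' = '"') := by
        simpa [markerB, and_assoc] using hm
      simp only [List.getD] at hk
      simp only [hm, Bool.false_eq_true, if_false, List.foldl_nil, cutAt_succ]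
      simp only [stepA, List.getD]
      rw [if_neg hk]
      rfl

lemma core_eq (cs : List Char) : igCoreA cs = igCoreB cs := by
  unfold igCoreA igCoreB
  rw [loop_eq]

-- ===== VERDICT (by name: the statement is the Claim_ definition above) =====
theorem igSplit_spec : Claim_equal_igSplit := by
  intro t _ _
  unfold Spec_igSplit igSplit igSplit_alt
  rw [core_eq]
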